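-- pv_equiv track=rewrite | github.com/shivammehta25/Fun-Coding | CodeSignal/challenges/shuffledArray.py | shuffledArray
-- ===== SOURCE A (Python) =====
-- def shuffledArray(shuffled):
--     sum_of_array = sum(shuffled)
--     op = []
--     removed = False
--     for s in shuffled:
--         if sum_of_array - s != s or removed:
--             op.append(s)
--         else:
--             removed = True
--
--     return sorted(op)
-- ===== SOURCE B (Python) =====
-- def shuffledArray(shuffled):
--     total = sum(shuffled)
--     counts = {}
--     for s in shuffled:
--         counts[s] = counts.get(s, 0) + 1
--     if total % 2 == 0 and counts.get(total // 2, 0) > 0: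
--         counts[total // 2] = counts[total // 2] - 1
--     result = []
--     for v in sorted(counts):
--         result.extend([v] * counts[v])
--     return result
-- ===== Notes on version B (the rewrite author's own statement) =====
-- stated objective: alternative
-- what changed: B builds a value->count dictionary in one pass, decrements the count of total//2 once (when total is even and that key exists), and reconstructs the output by sorting only the distinct keys and expanding each key by its count, instead of A's flagged filtering pass over the raw list followed by a full sort.
import Mathlib
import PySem

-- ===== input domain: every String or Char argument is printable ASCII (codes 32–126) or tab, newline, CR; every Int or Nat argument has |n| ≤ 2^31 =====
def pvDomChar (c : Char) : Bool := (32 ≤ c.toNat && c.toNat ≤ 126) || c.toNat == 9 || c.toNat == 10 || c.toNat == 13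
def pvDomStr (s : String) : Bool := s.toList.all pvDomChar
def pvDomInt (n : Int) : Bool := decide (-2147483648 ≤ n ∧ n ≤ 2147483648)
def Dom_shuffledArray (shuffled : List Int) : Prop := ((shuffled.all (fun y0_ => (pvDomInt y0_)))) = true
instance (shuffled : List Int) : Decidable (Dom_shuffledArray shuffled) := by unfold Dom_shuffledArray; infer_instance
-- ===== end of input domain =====

-- B counts occurrences in a dict, decrements the count of total//2 once, and rebuilds the
-- output from the sorted distinct keys with their counts (alternative counting decomposition).


-- ===== PORT A =====
def shuffledArray (shuffled : List Int) : List Int :=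
  let sum_of_array := shuffled.sum
  let st := shuffled.foldl
    (fun (st : List Int × Bool) s =>
      if sum_of_array - s ≠ s ∨ st.2 = true then (st.1 ++ [s], st.2) else (st.1, true))
    ([], false)
  PySem.List.sorted st.1 (fun x => x) false

-- ===== PORT B =====
-- counts[v] in the final loop is a plain lookup of an existing key: ported as getD v 0
def shuffledArray_alt (shuffled : List Int) : List Int :=
  let total := shuffled.sum
  let counts := shuffled.foldl
    (fun (d : PySem.Dict Int Int) s => d.insert s (d.getD s 0 + 1)) PySem.Dict.empty
  let counts2 :=
    if PySem.Int.mod total 2 = 0 ∧ counts.getD (PySem.Int.floordiv total 2) 0 > 0 then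
      counts.insert (PySem.Int.floordiv total 2)
        (counts.getD (PySem.Int.floordiv total 2) 0 - 1)
    else counts
  (PySem.List.sorted counts2.keys (fun x => x) false).foldl
    (fun acc v => acc ++ PySem.List.pyRepeat [v] (counts2.getD v 0)) []

-- ===== PRECONDITION & SPEC =====
def Spec_shuffledArray (shuffled : List Int) (out : List Int) : Prop := out = shuffledArray_alt shuffled
instance (shuffled : List Int) (out : List Int) : Decidable (Spec_shuffledArray shuffled out) := by unfold Spec_shuffledArray; infer_instance

-- ===== CLAIM =====
def Claim_equal_shuffledArray : Prop := ∀ (shuffled : List Int), Dom_shuffledArray shuffled → Spec_shuffledArray shuffled (shuffledArray shuffled)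

-- ===== LEMMAS AND PROOFS =====

-- A's loop once the flag is set: it just copies the rest
theorem pvFoldA_true (total : Int) (l acc : List Int) :
    l.foldl (fun (st : List Int × Bool) s =>
      if total - s ≠ s ∨ st.2 = true then (st.1 ++ [s], st.2) else (st.1, true)) (acc, true)
    = (acc ++ l, true) := by
  induction l generalizing acc with
  | nil => simp
  | cons s t ih => simp [List.foldl, ih]

-- drop the first element with total - s == s (characterises A's filtering pass)
def pvDelFirst (total : Int) : List Int → List Int
  | [] => []
  | s :: t => if total - s = s then t else s :: pvDelFirst total t

-- A's loop with the flag unset computes pvDelFirst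
theorem pvFoldA_false (total : Int) (l acc : List Int) :
    (l.foldl (fun (st : List Int × Bool) s =>
      if total - s ≠ s ∨ st.2 = true then (st.1 ++ [s], st.2) else (st.1, true)) (acc, false)).1
    = acc ++ pvDelFirst total l := by
  induction l generalizing acc with
  | nil => simp [pvDelFirst]
  | cons s t ih =>
    by_cases h : total - s = s
    · simp [List.foldl, h, pvFoldA_true, pvDelFirst]
    · simp [List.foldl, h, ih, pvDelFirst]

theorem pvDelFirst_no_match (total : Int) (l : List Int)
    (h : ∀ s ∈ l, total - s ≠ s) : pvDelFirst total l = l := by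
  induction l with
  | nil => rfl
  | cons s t ih =>
    simp [pvDelFirst, h s (by simp)]
    exact ih (fun x hx => h x (by simp [hx]))

theorem pvDelFirst_eq_erase (total v : Int) (l : List Int)
    (h : ∀ s : Int, total - s = s ↔ s = v) : pvDelFirst total l = l.erase v := by
  induction l with
  | nil => rfl
  | cons s t ih =>
    by_cases hs : total - s = s
    · have hsv : s = v := (h s).mp hs
      subst hsv
      simp only [pvDelFirst]
      rw [if_pos hs, List.erase_cons_head]
    · have hsv : s ≠ v := fun e => hs ((h s).mpr e)
      simp only [pvDelFirst]
      rw [if_neg hs, List.erase_cons_tail (by simp [hsv]), ih]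

-- arithmetic: "total - v = v" names total's half
theorem pvEven (v t : Int) (h : t - v = v) :
    PySem.Int.mod t 2 = 0 ∧ PySem.Int.floordiv t 2 = v := by
  rw [PySem.Int.mod_eq_emod_of_pos (by norm_num : (0:Int) < 2),
      PySem.Int.floordiv_eq_ediv_of_pos (by norm_num : (0:Int) < 2)]
  omega

theorem pvHalfEq (t : Int) (h : PySem.Int.mod t 2 = 0) :
    PySem.Int.floordiv t 2 + PySem.Int.floordiv t 2 = t := by
  rw [PySem.Int.mod_eq_emod_of_pos (by norm_num : (0:Int) < 2)] at h
  rw [PySem.Int.floordiv_eq_ediv_of_pos (by norm_num : (0:Int) < 2)]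
  omega

-- count of a flatMap of replicates over a Nodup key list
theorem pvCount_flatMap (K : List Int) (c : Int → Nat) (hK : K.Nodup) (x : Int) :
    (K.flatMap (fun v => List.replicate (c v) v)).count x = if x ∈ K then c x else 0 := by
  induction K with
  | nil => simp
  | cons k t ih =>
    have hk : k ∉ t := (List.nodup_cons.mp hK).1
    have ht := (List.nodup_cons.mp hK).2
    by_cases hx : x = k
    · subst hx
      simp [List.count_append, ih ht, hk]
    · simp [List.count_append, List.count_replicate, ih ht, hx, Ne.symm hx]

-- a flatMap of replicates over a strictly increasing key list is sorted
theorem pvPairwise_flatMap (K : List Int) (c : Int → Nat) (hK : K.Pairwise (· < ·)) :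
    (K.flatMap (fun v => List.replicate (c v) v)).Pairwise (· ≤ ·) := by
  induction K with
  | nil => simp
  | cons k t ih =>
    have hlt := (List.pairwise_cons.mp hK).1
    have ht := (List.pairwise_cons.mp hK).2
    simp only [List.flatMap_cons]
    refine List.pairwise_append.mpr ⟨?_, ih ht, ?_⟩
    · exact List.pairwise_replicate.mpr (Or.inr le_rfl)
    · intro a ha b hb
      obtain ⟨v, hv, hbv⟩ := List.mem_flatMap.mp hb
      have := List.eq_of_mem_replicate ha
      have := List.eq_of_mem_replicate hbv
      subst_vars
      exact le_of_lt (hlt v hv)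

-- the common shape of both case analyses
theorem pvMain (K : List Int) (c : Int → Nat) (op : List Int)
    (hlt : K.Pairwise (· < ·))
    (hcount : ∀ x, op.count x = if x ∈ K then c x else 0) :
    PySem.List.sorted op (fun x => x) false = K.flatMap (fun v => List.replicate (c v) v) := by
  refine PySem.List.sorted_id_eq_of_perm_of_pairwise _ _ ?_ ?_
  · refine List.perm_iff_count.mpr (fun x => ?_)
    rw [pvCount_flatMap K c hlt.nodup x, hcount]
  · exact pvPairwise_flatMap K c hlt

-- ===== VERDICT =====
theorem shuffledArray_spec : Claim_equal_shuffledArray := by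
  intro l _
  show _ = _
  unfold shuffledArray shuffledArray_alt
  simp only [pvFoldA_false, List.nil_append, PySem.Dict.foldl_insert_getD_add_one_eq_counter,
    PySem.List.foldl_append_eq_flatMap, PySem.List.pyRepeat_singleton]
  set t := l.sum with ht
  set h2 := PySem.Int.floordiv t 2 with hh2
  by_cases hc : PySem.Int.mod t 2 = 0 ∧ (PySem.Dict.counter l).getD h2 0 > 0
  · rw [if_pos hc]
    have hhalf : t - h2 = h2 := by have := pvHalfEq t hc.1; omega
    have hmem : h2 ∈ l := by
      have := hc.2
      rw [PySem.Dict.getD_counter] at this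
      exact List.count_pos_iff.mp (by exact_mod_cast this)
    have hkeys : ((PySem.Dict.counter l).insert h2 ((PySem.Dict.counter l).getD h2 0 - 1)).keys
        = PySem.Set.ofList l := by
      rw [PySem.Dict.keys_insert_of_contains, PySem.Dict.keys_counter]
      rw [PySem.Dict.contains_counter]; simpa using hmem
    rw [hkeys]
    rw [pvDelFirst_eq_erase t h2 l (fun s => by constructor <;> intro h <;> omega)]
    have hgd : ∀ v : Int,
        (((PySem.Dict.counter l).insert h2 ((PySem.Dict.counter l).getD h2 0 - 1)).getD v 0)
        = if v = h2 then (l.count h2 : Int) - 1 else (l.count v : Int) := by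
      intro v
      by_cases hv : v = h2
      · subst hv; rw [PySem.Dict.getD_insert_self, PySem.Dict.getD_counter]; simp
      · rw [PySem.Dict.getD_insert_of_ne _ _ _ hv, PySem.Dict.getD_counter, if_neg hv]
    have hrw : (fun v => List.replicate ((((PySem.Dict.counter l).insert h2
          ((PySem.Dict.counter l).getD h2 0 - 1)).getD v 0)).toNat v)
        = fun v => List.replicate ((if v = h2 then (l.count h2 : Int) - 1 else (l.count v : Int)).toNat) v := by
      funext v; rw [hgd v]
    rw [hrw]
    refine pvMain _ _ _ (PySem.List.sorted_ofList_pairwise_lt l) (fun x => ?_)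
    have hx : x ∈ PySem.List.sorted (PySem.Set.ofList l) (fun x => x) false ↔ x ∈ l := by
      rw [PySem.List.mem_sorted, PySem.Set.mem_ofList]
    by_cases hxl : x ∈ l
    · rw [if_pos (hx.mpr hxl)]
      by_cases hxh : x = h2
      · have h1 : 1 ≤ l.count h2 := List.count_pos_iff.mpr (hxh ▸ hxl)
        rw [hxh, List.count_erase_self, if_pos rfl]
        omega
      · rw [if_neg hxh, List.count_erase_of_ne hxh, Int.toNat_natCast]
    · rw [if_neg (fun h => hxl (hx.mp h))]
      have : x ∉ l.erase h2 := fun h => hxl (List.mem_of_mem_erase h)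
      exact List.count_eq_zero.mpr this
  · rw [if_neg hc]
    have hnom : ∀ s ∈ l, t - s ≠ s := by
      intro s hs hss
      obtain ⟨hm, hf⟩ := pvEven s t hss
      exact hc ⟨hm, by
        rw [← hh2] at hf
        rw [hf, PySem.Dict.getD_counter]
        exact_mod_cast List.count_pos_iff.mpr hs⟩
    rw [pvDelFirst_no_match t l hnom, PySem.Dict.keys_counter]
    have hrw : (fun v => List.replicate (((PySem.Dict.counter l).getD v 0)).toNat v)
        = fun v => List.replicate (l.count v) v := by
      funext v; rw [PySem.Dict.getD_counter, Int.toNat_natCast]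
    rw [hrw]
    refine pvMain _ _ _ (PySem.List.sorted_ofList_pairwise_lt l) (fun x => ?_)
    have hx : x ∈ PySem.List.sorted (PySem.Set.ofList l) (fun x => x) false ↔ x ∈ l := by
      rw [PySem.List.mem_sorted, PySem.Set.mem_ofList]
    by_cases hxl : x ∈ l
    · rw [if_pos (hx.mpr hxl)]
    · rw [if_neg (fun h => hxl (hx.mp h))]
      exact List.count_eq_zero.mpr hxl
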